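-- pv_equiv track=rewrite | github.com/khanyicode/Sodoku_game_using_Recursion | sodoku.py | find_empty_recursive
-- ===== SOURCE A (Python) =====
-- board = [
--     [5, 3, 0, 0, 7, 0, 0, 0, 0],
--     [6, 0, 0, 1, 9, 5, 0, 0, 0],
--     [0, 9, 8, 0, 0, 0, 0, 6, 0],
--     [8, 0, 0, 0, 6, 0, 0, 0, 3],
--     [4, 0, 0, 8, 0, 3, 0, 0, 1],
--     [7, 0, 0, 0, 2, 0, 0, 0, 6],
--     [0, 6, 0, 0, 0, 0, 2, 8, 0],
--     [0, 0, 0, 4, 1, 9, 0, 0, 5],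
--     [0, 0, 0, 0, 8, 0, 0, 7, 9]
-- ]
--
-- def find_empty_recursive(board, row, col):
--     if row == len(board):
--         return None  # Reached the end of the board, no empty cell found
--
--     if col == len(board[row]):
--         return find_empty_recursive(board, row + 1, 0)  # Moves to the next row
--
--     if board[row][col] == 0:
--         return row, col  # Found an empty cell
--
--     return find_empty_recursive(board, row, col + 1)  # Move to the next column
-- ===== SOURCE B (Python) =====
-- def find_empty_recursive(board, row, col):
--     # Idiomatic iterative rewrite: finish the starting row from `col`, then
--     # sweep the remaining rows left-to-right; empty ranges make the wrap cases fall through.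
--     if row != len(board):
--         for c in range(col, len(board[row])):
--             if board[row][c] == 0:
--                 return (row, c)
--         for r in range(row + 1, len(board)):
--             for c in range(len(board[r])):
--                 if board[r][c] == 0:
--                     return (r, c)
--     return None
-- ===== Notes on version B (the rewrite author's own statement) =====
-- stated objective: idiomatic
-- what changed: Replaced the tail recursion over (row, col) with two explicit range scans: finish the starting row from col, then sweep the remaining rows left-to-right; empty ranges subsume the col==len wrap branch.
import Mathlib
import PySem

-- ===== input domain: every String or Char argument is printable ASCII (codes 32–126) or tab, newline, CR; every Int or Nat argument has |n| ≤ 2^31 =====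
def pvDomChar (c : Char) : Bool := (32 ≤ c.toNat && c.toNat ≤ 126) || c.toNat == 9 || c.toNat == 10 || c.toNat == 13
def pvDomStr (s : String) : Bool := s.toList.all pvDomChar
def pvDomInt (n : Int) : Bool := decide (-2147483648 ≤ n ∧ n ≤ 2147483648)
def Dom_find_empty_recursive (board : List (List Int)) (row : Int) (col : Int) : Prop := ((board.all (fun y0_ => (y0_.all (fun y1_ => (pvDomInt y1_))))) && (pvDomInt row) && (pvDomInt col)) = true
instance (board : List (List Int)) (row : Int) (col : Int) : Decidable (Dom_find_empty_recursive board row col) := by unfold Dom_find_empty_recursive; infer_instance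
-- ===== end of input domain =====

-- B replaces A's (row, col) tail recursion by two explicit range scans (idiomatic; same cost).

-- ===== PORT A =====
-- Literal port of A's recursion; Python IndexError (board[row] / board[row][col]
-- out of range, including negative-wrap lookups) surfaces as the `none` branch of
-- PySem.List.pyGet? and is excluded by Pre_ below.
def find_empty_recursive (board : List (List Int)) (row : Int) (col : Int) : Option (Int × Int) :=
  if row = (board.length : Int) then none
  else
    match hrw : PySem.List.pyGet? board row with
    | none => none  -- IndexError in Python; outside Pre_
    | some rw =>
      if col = (rw.length : Int) then find_empty_recursive board (row + 1) 0
      else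
        match hv : PySem.List.pyGet? rw col with
        | none => none  -- IndexError in Python; outside Pre_
        | some v =>
          if v = 0 then some (row, col)
          else find_empty_recursive board row (col + 1)
termination_by (((board.length : Int) - row).toNat, (((PySem.List.pyGetD board row []).length : Int) - col).toNat)
decreasing_by
  · have h : ¬ PySem.List.pyGet? board row = none := by simp [hrw]
    rw [PySem.List.pyGet?_eq_none_iff] at h
    unfold PySem.Raise.InRange at h
    push Not at h
    left; omega
  · have h : ¬ PySem.List.pyGet? rw col = none := by simp [hv]
    rw [PySem.List.pyGet?_eq_none_iff] at h
    unfold PySem.Raise.InRange at h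
    have : PySem.List.pyGetD board row [] = rw := by
      simp [PySem.List.pyGetD, hrw]
    right
    rw [this]
    push Not at h
    omega

-- ===== PORT B =====
-- B's inner "for c in range(...): if board[r][c] == 0: return (r, c)" loop
def pvScanRow (r : List Int) (ri : Int) (lo hi : Int) : Option (Int × Int) :=
  (PySem.List.pyRange lo hi 1).findSome? (fun c =>
    match PySem.List.pyGet? r c with
    | some v => if v = 0 then some (ri, c) else none
    | none => none)

def find_empty_recursive_alt (board : List (List Int)) (row : Int) (col : Int) : Option (Int × Int) :=
  if row ≠ (board.length : Int) then
    match PySem.List.pyGet? board row with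
    | none => none  -- IndexError in Python; outside Pre_
    | some rw =>
      match pvScanRow rw row col (rw.length : Int) with
      | some p => some p
      | none =>
        (PySem.List.pyRange (row + 1) (board.length : Int) 1).findSome? (fun r =>
          match PySem.List.pyGet? board r with
          | some rw' => pvScanRow rw' r 0 (rw'.length : Int)
          | none => none)
  else none

-- ===== PRECONDITION & SPEC =====
-- Pre_ is exactly the set of inputs on which the Python A returns (no IndexError):
-- either row == len(board), or row is a valid (possibly negative) row index and
-- col lies in [-len(board[row]), len(board[row])].
def Pre_find_empty_recursive (board : List (List Int)) (row : Int) (col : Int) : Prop :=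
  row = (board.length : Int) ∨
    (-(board.length : Int) ≤ row ∧ row < (board.length : Int) ∧
      -((PySem.List.pyGetD board row []).length : Int) ≤ col ∧
      col ≤ ((PySem.List.pyGetD board row []).length : Int))
instance (board : List (List Int)) (row : Int) (col : Int) : Decidable (Pre_find_empty_recursive board row col) := by unfold Pre_find_empty_recursive; infer_instance

def pvWitness_find_empty_recursive : List (List Int) × Int × Int := ([[1, 0], [2, 3]], 0, 0)

def Spec_find_empty_recursive (board : List (List Int)) (row : Int) (col : Int) (out : Option (Int × Int)) : Prop := out = find_empty_recursive_alt board row col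
instance (board : List (List Int)) (row : Int) (col : Int) (out : Option (Int × Int)) : Decidable (Spec_find_empty_recursive board row col out) := by unfold Spec_find_empty_recursive; infer_instance

-- ===== CLAIM (what is proved, stated in full; the proofs are below) =====
def Claim_equal_find_empty_recursive : Prop := ∀ (board : List (List Int)) (row : Int) (col : Int), Dom_find_empty_recursive board row col → Pre_find_empty_recursive board row col → Spec_find_empty_recursive board row col (find_empty_recursive board row col)

-- ===== LEMMAS AND PROOFS =====

theorem pv_inRange_of_some {a : Type} {xs : List a} {i : Int} {x : a}
    (h : PySem.List.pyGet? xs i = some x) : -(xs.length : Int) ≤ i ∧ i < (xs.length : Int) := by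
  have h5 : PySem.List.pyGet? xs i = none ↔ ¬ PySem.Raise.InRange xs.length i :=
    PySem.List.pyGet?_eq_none_iff xs i
  have h2 : ¬ ¬ PySem.Raise.InRange xs.length i := fun hc => by
    rw [h5.mpr hc] at h
    simp at h
  have h3 := not_not.mp h2
  unfold PySem.Raise.InRange at h3
  exact h3

theorem pv_some_of_inRange {a : Type} (xs : List a) (i : Int)
    (h1 : -(xs.length : Int) ≤ i) (h2 : i < (xs.length : Int)) :
    ∃ x, PySem.List.pyGet? xs i = some x := by
  cases hx : PySem.List.pyGet? xs i with
  | some x => exact ⟨x, rfl⟩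
  | none =>
    rw [PySem.List.pyGet?_eq_none_iff] at hx
    unfold PySem.Raise.InRange at hx
    exact absurd ⟨h1, h2⟩ hx

-- B at an exhausted column (col = row length) equals B at the start of the next row.
theorem alt_wrap (board : List (List Int)) (row : Int) (rw : List Int)
    (hrow : -(board.length : Int) ≤ row) (hlt : row < (board.length : Int))
    (hrw : PySem.List.pyGet? board row = some rw) :
    find_empty_recursive_alt board row (rw.length : Int) =
      find_empty_recursive_alt board (row + 1) 0 := by
  have hscan : pvScanRow rw row (rw.length : Int) (rw.length : Int) = none := by
    unfold pvScanRow
    rw [PySem.List.pyRange_one_eq_nil (by omega)]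
    rfl
  by_cases hend : row + 1 = (board.length : Int)
  · unfold find_empty_recursive_alt
    simp only [hrw, hscan, if_pos (by omega : row ≠ (board.length : Int)), ne_eq, hend,
      not_true_eq_false, if_false]
    rw [PySem.List.pyRange_one_eq_nil (by omega)]
    rfl
  · obtain ⟨rw1, hrw1⟩ := pv_some_of_inRange board (row + 1) (by omega) (by omega)
    unfold find_empty_recursive_alt
    simp only [hrw, hscan, if_pos (by omega : row ≠ (board.length : Int)),
      if_pos (by omega : row + 1 ≠ (board.length : Int)), hrw1]
    rw [PySem.List.pyRange_one_cons (by omega), List.findSome?_cons]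
    simp only [hrw1]
    cases pvScanRow rw1 (row + 1) 0 (rw1.length : Int) <;> rfl

-- B at a non-zero valid cell steps to the next column.
theorem alt_step (board : List (List Int)) (row col : Int) (rw : List Int) (v : Int)
    (hrw : PySem.List.pyGet? board row = some rw)
    (hne : row ≠ (board.length : Int))
    (hv : PySem.List.pyGet? rw col = some v) (hv0 : v ≠ 0) :
    find_empty_recursive_alt board row col = find_empty_recursive_alt board row (col + 1) := by
  have hcl : col < (rw.length : Int) := (pv_inRange_of_some hv).2
  have hscan : pvScanRow rw row col (rw.length : Int) =
      pvScanRow rw row (col + 1) (rw.length : Int) := by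
    unfold pvScanRow
    rw [PySem.List.pyRange_one_cons (by omega), List.findSome?_cons]
    simp [hv, hv0]
  unfold find_empty_recursive_alt
  simp only [hrw, hscan, if_pos hne]

-- B at a zero valid cell returns it.
theorem alt_found (board : List (List Int)) (row col : Int) (rw : List Int)
    (hrw : PySem.List.pyGet? board row = some rw)
    (hne : row ≠ (board.length : Int))
    (hv : PySem.List.pyGet? rw col = some 0) :
    find_empty_recursive_alt board row col = some (row, col) := by
  have hcl : col < (rw.length : Int) := (pv_inRange_of_some hv).2
  have hscan : pvScanRow rw row col (rw.length : Int) = some (row, col) := by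
    unfold pvScanRow
    rw [PySem.List.pyRange_one_cons (by omega), List.findSome?_cons]
    simp [hv]
  unfold find_empty_recursive_alt
  simp only [hrw, hscan, if_pos hne]

theorem pv_main : ∀ (board : List (List Int)) (row col : Int),
    Pre_find_empty_recursive board row col →
    find_empty_recursive board row col = find_empty_recursive_alt board row col := by
  intro board row col
  induction row, col using find_empty_recursive.induct (board := board) with
  | case1 col =>
    intro _
    rw [find_empty_recursive]
    unfold find_empty_recursive_alt
    simp
  | case2 row col hne hrw =>
    intro hpre
    rcases hpre with h | ⟨h1, h2, _, _⟩
    · exact absurd h hne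
    · obtain ⟨x, hx⟩ := pv_some_of_inRange board row h1 h2
      rw [hx] at hrw
      simp at hrw
  | case3 row hne rw hrw ih =>
    intro _
    have hr := pv_inRange_of_some hrw
    have hstep : find_empty_recursive board (row + 1) 0 =
        find_empty_recursive_alt board (row + 1) 0 := by
      apply ih
      by_cases hend : row + 1 = (board.length : Int)
      · exact Or.inl hend
      · exact Or.inr ⟨by omega, by omega, by omega, by omega⟩
    rw [alt_wrap board row rw hr.1 hr.2 hrw, find_empty_recursive]
    simp only [if_neg hne]
    split
    · next heq => rw [heq] at hrw; simp at hrw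
    · next rw1 heq =>
      rw [heq] at hrw
      injection hrw with hE
      subst hE
      simp only [if_pos rfl]
      exact hstep
  | case4 row col hne rw hrw hcol hv =>
    intro hpre
    rcases hpre with h | ⟨h1, h2, h3, h4⟩
    · exact absurd h hne
    · have hrwD : PySem.List.pyGetD board row [] = rw := by
        unfold PySem.List.pyGetD
        rw [hrw]
        rfl
      rw [hrwD] at h3 h4
      obtain ⟨x, hx⟩ := pv_some_of_inRange rw col h3 (by omega)
      rw [hx] at hv
      simp at hv
  | case5 row col hne rw hrw hcol hv =>
    intro _
    rw [alt_found board row col rw hrw hne hv, find_empty_recursive]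
    simp only [if_neg hne]
    split
    · next heq => rw [heq] at hrw; simp at hrw
    · next rw1 heq =>
      rw [heq] at hrw
      injection hrw with hE
      subst hE
      simp only [if_neg hcol]
      split
      · next heq2 => rw [heq2] at hv; simp at hv
      · next v hv2 =>
        rw [hv2] at hv
        injection hv with hV
        subst hV
        simp
  | case6 row col hne rw hrw hcol v hv hv0 ih =>
    intro hpre
    rcases hpre with h | ⟨h1, h2, h3, h4⟩
    · exact absurd h hne
    · have hrwD : PySem.List.pyGetD board row [] = rw := by
        unfold PySem.List.pyGetD
        rw [hrw]
        rfl
      rw [hrwD] at h3 h4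
      have hcl : col < (rw.length : Int) := (pv_inRange_of_some hv).2
      have hstep : find_empty_recursive board row (col + 1) =
          find_empty_recursive_alt board row (col + 1) := by
        apply ih
        exact Or.inr ⟨h1, h2, by rw [hrwD]; omega, by rw [hrwD]; omega⟩
      rw [alt_step board row col rw v hrw hne hv hv0, find_empty_recursive]
      simp only [if_neg hne]
      split
      · next heq => rw [heq] at hrw; simp at hrw
      · next rw1 heq =>
        rw [heq] at hrw
        injection hrw with hE
        subst hE
        simp only [if_neg hcol]
        split
        · next heq2 => rw [heq2] at hv; simp at hv
        · next v1 hv2 =>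
          rw [hv2] at hv
          injection hv with hV
          subst hV
          rw [if_neg hv0]
          exact hstep

-- ===== VERDICT (by name: the statement is the Claim_ definition above) =====
theorem find_empty_recursive_spec : Claim_equal_find_empty_recursive := by
  intro board row col _ hpre
  unfold Spec_find_empty_recursive
  exact pv_main board row col hpre
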